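-- pv_equiv track=rewrite | github.com/allee-ai/AI_OS | agent/threads/linking_core/schema.py | _is_concept_anchored
-- ===== SOURCE A (Python) =====
-- def _is_concept_anchored(concept: str, anchor_keys: set) -> bool:
--     """
--     Return True if the concept is anchored to a real stored fact.
--
--     A concept 'a.b.c' is anchored when any stored key is:
--       - an exact match ('a.b.c'), OR
--       - a prefix of the concept ('a.b' → 'a.b.c' is a child), OR
--       - the concept itself is a prefix of a stored key ('a.b' stored, concept 'a' is its parent)
--
--     This accepts both parents and children of fact keys so the whole
--     identity subtree stays connected.
--     """
--     c = concept.strip().lower()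
--     for key in anchor_keys:
--         if c == key:
--             return True
--         # concept is a child: key is 'sarah.email', concept is 'sarah.email.work'
--         if c.startswith(key + "."):
--             return True
--         # concept is a parent: key is 'sarah.email', concept is 'sarah'
--         if key.startswith(c + "."):
--             return True
--     return False
-- ===== SOURCE B (Python) =====
-- def _is_concept_anchored(concept: str, anchor_keys: set) -> bool:
--     # B: instead of testing every key three ways, build the dot-boundary
--     # prefixes of the concept once (handles exact match + child), then do a
--     # single startswith scan for the parent case.
--     c = concept.strip().lower()
--     prefixes = [c[:i] for i, ch in enumerate(c) if ch == '.']
--     prefixes.append(c)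
--     if any(p in anchor_keys for p in prefixes):
--         return True
--     dot = c + '.'
--     return any(key.startswith(dot) for key in anchor_keys)
-- ===== Notes on version B (the rewrite author's own statement) =====
-- stated objective: faster
-- what changed: Instead of testing every key three ways in one loop, B derives the dot-boundary prefixes of the concept once and checks them against the key set via O(1) membership (covering exact-match and child cases), leaving only a single startswith scan for the parent case.
import Mathlib
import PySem

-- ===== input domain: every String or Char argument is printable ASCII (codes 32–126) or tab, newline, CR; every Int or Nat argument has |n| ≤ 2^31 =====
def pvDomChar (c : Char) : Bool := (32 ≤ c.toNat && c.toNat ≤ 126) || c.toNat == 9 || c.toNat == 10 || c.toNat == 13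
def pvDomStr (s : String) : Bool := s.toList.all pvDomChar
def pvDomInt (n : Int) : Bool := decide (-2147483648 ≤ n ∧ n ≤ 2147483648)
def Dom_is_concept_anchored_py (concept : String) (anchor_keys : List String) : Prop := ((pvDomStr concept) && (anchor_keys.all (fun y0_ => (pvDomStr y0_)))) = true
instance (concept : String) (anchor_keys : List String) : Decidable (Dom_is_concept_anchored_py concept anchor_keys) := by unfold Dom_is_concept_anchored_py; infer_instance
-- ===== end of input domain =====

-- B replaces A's uniform three-test loop over the keys by a dot-boundary prefix
-- list of the concept checked against the key set plus one narrower startswith scan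
-- (alternative decomposition; return value only — neither version mutates anything).

-- ===== PORT A =====
-- the 'for key in anchor_keys' loop with its three early returns
def isAnchoredLoopA (c : List Char) : List String → Bool
  | [] => false
  | key :: ks =>
      if c = key.toList then true
      else if PySem.Chars.startswith c (key.toList ++ ['.']) then true
      else if PySem.Chars.startswith key.toList (c ++ ['.']) then true
      else isAnchoredLoopA c ks

def is_concept_anchored_py (concept : String) (anchor_keys : List String) : Bool :=
  let c := PySem.Chars.lower (PySem.Chars.strip concept.toList)
  isAnchoredLoopA c anchor_keys

-- ===== PORT B =====
-- [c[:i] for i, ch in enumerate(c) if ch == '.']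
def dotPrefixes (c : List Char) : List (List Char) :=
  (PySem.List.enumerate c 0).filterMap
    (fun p => if p.2 = '.' then some (PySem.List.slice c none (some p.1)) else none)

def is_concept_anchored_py_alt (concept : String) (anchor_keys : List String) : Bool :=
  let c := PySem.Chars.lower (PySem.Chars.strip concept.toList)
  let prefixes := dotPrefixes c ++ [c]
  if prefixes.any (fun p => anchor_keys.any (fun key => key.toList = p)) then true
  else anchor_keys.any (fun key => PySem.Chars.startswith key.toList (c ++ ['.']))

-- ===== PRECONDITION & SPEC =====
def Spec_is_concept_anchored_py (concept : String) (anchor_keys : List String) (out : Bool) : Prop := out = is_concept_anchored_py_alt concept anchor_keys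
instance (concept : String) (anchor_keys : List String) (out : Bool) : Decidable (Spec_is_concept_anchored_py concept anchor_keys out) := by unfold Spec_is_concept_anchored_py; infer_instance

-- ===== CLAIM (what is proved, stated in full; the proofs are below) =====
def Claim_equal_is_concept_anchored_py : Prop := ∀ (concept : String) (anchor_keys : List String), Dom_is_concept_anchored_py concept anchor_keys → Spec_is_concept_anchored_py concept anchor_keys (is_concept_anchored_py concept anchor_keys)

-- ===== LEMMAS AND PROOFS =====

-- A's loop is an `any` over its three tests
theorem isAnchoredLoopA_eq_any (cs : List Char) (ks : List String) :
    isAnchoredLoopA cs ks = ks.any (fun key =>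
      decide (cs = key.toList) || PySem.Chars.startswith cs (key.toList ++ ['.'])
        || PySem.Chars.startswith key.toList (cs ++ ['.'])) := by
  induction ks with
  | nil => rfl
  | cons k ks ih =>
      simp only [isAnchoredLoopA, List.any_cons, ← ih]
      by_cases h1 : cs = k.toList <;> by_cases h2 : PySem.Chars.startswith cs (k.toList ++ ['.']) <;>
        by_cases h3 : PySem.Chars.startswith k.toList (cs ++ ['.']) <;>
        simp [h1, h2, h3]

-- membership in B's prefix list = exact match or dot-boundary prefix
theorem mem_dotPrefixes_iff (cs k : List Char) :
    k ∈ dotPrefixes cs ++ [cs] ↔ cs = k ∨ (k ++ ['.']) <+: cs := by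
  simp only [dotPrefixes, List.mem_append, List.mem_filterMap, List.mem_singleton]
  constructor
  · rintro (⟨p, hp, hif⟩ | rfl)
    · rw [PySem.List.mem_enumerate_iff cs 0 p] at hp
      obtain ⟨j, hj, rfl⟩ := hp
      by_cases hdot : cs[j] = '.'
      case neg => simp [hdot] at hif
      rw [if_pos hdot] at hif
      right
      have hsl : PySem.List.slice cs none (some ((0 : Int) + (j : Nat))) = cs.take j := by
        have h0 : ((0 : Int) + (j : Nat)) = ((j : Nat) : Int) := zero_add _
        rw [h0, PySem.List.slice_to cs (by positivity)]
        simp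
      have hk : k = cs.take j := by rw [← Option.some.inj hif, hsl]
      subst hk
      refine ⟨cs.drop (j + 1), ?_⟩
      have hdrop : cs.drop j = cs[j] :: cs.drop (j + 1) := List.drop_eq_getElem_cons hj
      calc cs.take j ++ ['.'] ++ cs.drop (j + 1)
          = cs.take j ++ ('.' :: cs.drop (j + 1)) := by simp
        _ = cs.take j ++ cs.drop j := by rw [hdrop, hdot]
        _ = cs := List.take_append_drop j cs
    · exact Or.inl rfl
  · rintro (rfl | ⟨rest, hrest⟩)
    · exact Or.inr rfl
    · left
      have hlen : k.length < cs.length := by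
        rw [← hrest]
        simp [List.length_append]
      have hget : cs[k.length]'hlen = '.' := by
        subst hrest
        simp
      refine ⟨((0 : Int) + (k.length : Nat), '.'), ?_, ?_⟩
      · rw [PySem.List.mem_enumerate_iff cs 0]
        exact ⟨k.length, hlen, by rw [hget]⟩
      · have h0 : ((0 : Int) + (k.length : Nat)) = ((k.length : Nat) : Int) := zero_add _
        rw [if_pos rfl, h0, PySem.List.slice_to cs (by positivity)]
        congr 1
        rw [← hrest]
        simp

-- the two algorithms agree for any stripped/lowered concept
theorem core_eq (cs : List Char) (ks : List String) :
    isAnchoredLoopA cs ks =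
      (if (dotPrefixes cs ++ [cs]).any (fun p => ks.any (fun key => key.toList = p)) then true
       else ks.any (fun key => PySem.Chars.startswith key.toList (cs ++ ['.']))) := by
  rw [isAnchoredLoopA_eq_any, Bool.eq_iff_iff]
  constructor
  · intro h
    rw [List.any_eq_true] at h
    obtain ⟨key, hk, htest⟩ := h
    simp only [Bool.or_eq_true, decide_eq_true_eq, PySem.Chars.startswith_iff] at htest
    rcases htest with (h1 | h2) | h3
    · rw [if_pos ((List.any_eq_true).2
        ⟨key.toList, (mem_dotPrefixes_iff cs key.toList).2 (Or.inl h1),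
          (List.any_eq_true).2 ⟨key, hk, by simp⟩⟩)]
    · rw [if_pos ((List.any_eq_true).2
        ⟨key.toList, (mem_dotPrefixes_iff cs key.toList).2 (Or.inr h2),
          (List.any_eq_true).2 ⟨key, hk, by simp⟩⟩)]
    · split_ifs with hmem
      · rfl
      · rw [List.any_eq_true]
        exact ⟨key, hk, (PySem.Chars.startswith_iff _ _).2 h3⟩
  · intro h
    split_ifs at h with hmem
    · rw [List.any_eq_true] at hmem
      obtain ⟨p, hp, hany⟩ := hmem
      rw [List.any_eq_true] at hany
      obtain ⟨key, hk, hkey⟩ := hany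
      rw [decide_eq_true_eq] at hkey
      rw [List.any_eq_true]
      refine ⟨key, hk, ?_⟩
      rcases (mem_dotPrefixes_iff cs p).1 hp with h1 | h2
      · simp [hkey, h1]
      · simp only [Bool.or_eq_true, decide_eq_true_eq, PySem.Chars.startswith_iff]
        exact Or.inl (Or.inr (hkey ▸ h2))
    · rw [List.any_eq_true] at h
      obtain ⟨key, hk, hkey⟩ := h
      rw [List.any_eq_true]
      exact ⟨key, hk, by simp [hkey]⟩

-- ===== VERDICT (by name: the statement is the Claim_ definition above) =====
theorem is_concept_anchored_py_spec : Claim_equal_is_concept_anchored_py := by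
  intro concept anchor_keys _
  unfold Spec_is_concept_anchored_py
  exact core_eq (PySem.Chars.lower (PySem.Chars.strip concept.toList)) anchor_keys
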